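-- pv_equiv track=rewrite | github.com/ir-nlp-csui/aksara | src/aksara/tokenizer.py | __getspaceafterflag
-- ===== SOURCE A (Python) =====
-- def __getspaceafterflag(tokens):
--     flag = [False for token in tokens if token != '']
--
--     # Iterate over list
--     i = 0
--     is_whitespace = True
--     for token in tokens:
--         if token == '':
--             is_whitespace = True
--         else:
--             flag[i] = not is_whitespace
--             i += 1
--             is_whitespace = False
--
--     return flag[1:] + [False]
-- ===== SOURCE B (Python) =====
-- def __getspaceafterflag(tokens):
--     positions = [i for i, t in enumerate(tokens) if t != '']
--     return [b == a + 1 for a, b in zip(positions, positions[1:])] + [False]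
-- ===== Notes on version B (the rewrite author's own statement) =====
-- stated objective: simpler
-- what changed: Replaces the pre-allocated mutable flag list updated by an index/whitespace state machine with a direct comprehension: collect indices of non-empty tokens, then test adjacency of consecutive indices via zip, appending the trailing False.
import Mathlib
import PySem

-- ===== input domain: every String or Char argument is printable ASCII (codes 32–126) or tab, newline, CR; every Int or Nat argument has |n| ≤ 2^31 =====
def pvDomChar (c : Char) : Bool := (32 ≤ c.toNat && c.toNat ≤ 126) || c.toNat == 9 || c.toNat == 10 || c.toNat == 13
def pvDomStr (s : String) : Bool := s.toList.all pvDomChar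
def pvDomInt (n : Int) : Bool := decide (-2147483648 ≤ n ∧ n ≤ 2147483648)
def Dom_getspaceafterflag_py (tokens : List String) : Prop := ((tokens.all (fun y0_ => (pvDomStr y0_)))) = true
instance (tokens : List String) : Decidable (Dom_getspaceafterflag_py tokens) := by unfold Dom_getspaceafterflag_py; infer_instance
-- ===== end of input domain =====

-- B replaces A's mutable flag array + index/whitespace state machine by a comprehension over
-- indices of non-empty tokens with an adjacency test on consecutive indices (objective: simpler).

-- ===== PORT A =====
-- the 'for token in tokens' loop with mutable state (flag, i, is_whitespace);
-- flag[i] = not is_whitespace is List.set (i is always in range, proved in the lemmas below)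
def getspaceafterflag_py_loop : List String → List Bool → Nat → Bool → List Bool
  | [], flag, _, _ => flag
  | t :: rest, flag, i, ws =>
    if t = "" then getspaceafterflag_py_loop rest flag i true
    else getspaceafterflag_py_loop rest (flag.set i (!ws)) (i + 1) false

def getspaceafterflag_py (tokens : List String) : List Bool :=
  PySem.List.slice
    (getspaceafterflag_py_loop tokens ((tokens.filter (fun t => t ≠ "")).map (fun _ => false)) 0 true)
    (some 1) none ++ [false]

-- ===== PORT B =====
-- positions = indices of non-empty tokens; zip(positions, positions[1:]) adjacency test, + [False]
def getspaceafterflag_py_positions (tokens : List String) : List Int :=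
  ((PySem.List.enumerate tokens 0).filter (fun p => p.2 ≠ "")).map (·.1)

def getspaceafterflag_py_alt (tokens : List String) : List Bool :=
  List.zipWith (fun a b => decide (b = a + 1))
    (getspaceafterflag_py_positions tokens)
    (PySem.List.slice (getspaceafterflag_py_positions tokens) (some 1) none) ++ [false]

-- ===== PRECONDITION & SPEC =====
def Spec_getspaceafterflag_py (tokens : List String) (out : List Bool) : Prop := out = getspaceafterflag_py_alt tokens
instance (tokens : List String) (out : List Bool) : Decidable (Spec_getspaceafterflag_py tokens out) := by unfold Spec_getspaceafterflag_py; infer_instance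

-- ===== CLAIM (what is proved, stated in full; the proofs are below) =====
def Claim_equal_getspaceafterflag_py : Prop := ∀ (tokens : List String), Dom_getspaceafterflag_py tokens → Spec_getspaceafterflag_py tokens (getspaceafterflag_py tokens)

-- ===== LEMMAS AND PROOFS =====

-- the flags A's loop writes for the non-empty tokens of ts, given incoming is_whitespace state
def pvSpecFlags : List String → Bool → List Bool
  | [], _ => []
  | t :: r, ws => if t = "" then pvSpecFlags r true else (!ws) :: pvSpecFlags r false

-- indices (offset n) of the non-empty tokens
def pvPosFrom : Int → List String → List Int
  | _, [] => []
  | n, t :: r => if t = "" then pvPosFrom (n + 1) r else n :: pvPosFrom (n + 1) r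

-- adjacency chain over a position list, carrying the previous position
def pvChain : Option Int → List Int → List Bool
  | _, [] => []
  | none, p :: rest => false :: pvChain (some p) rest
  | some q, p :: rest => decide (p = q + 1) :: pvChain (some p) rest

theorem pvTakeSet {α : Type} : ∀ (l : List α) (i : Nat) (b : α), i < l.length →
    (l.set i b).take (i + 1) = l.take i ++ [b] := by
  intro l
  induction l with
  | nil => intro i b h; simp at h
  | cons x xs ih =>
    intro i b h
    cases i with
    | zero => simp
    | succ i =>
      simp only [List.set_cons_succ, List.take_succ_cons, List.length_cons] at *
      rw [ih i b (by omega)]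
      simp

theorem pvLoop_eq_specFlags (ts : List String) :
    ∀ (flag : List Bool) (i : Nat) (ws : Bool),
      flag.length = i + (ts.filter (fun t => t ≠ "")).length →
      getspaceafterflag_py_loop ts flag i ws = flag.take i ++ pvSpecFlags ts ws := by
  induction ts with
  | nil =>
    intro flag i ws h
    simp only [List.filter_nil, List.length_nil, Nat.add_zero] at h
    simp [getspaceafterflag_py_loop, pvSpecFlags, List.take_of_length_le (Nat.le_of_eq h)]
  | cons t r ih =>
    intro flag i ws h
    simp only [getspaceafterflag_py_loop, pvSpecFlags]
    by_cases ht : t = ""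
    · rw [if_pos ht, if_pos ht]
      apply ih
      simpa [ht] using h
    · rw [if_neg ht, if_neg ht]
      rw [List.filter_cons_of_pos (by simp [ht])] at h
      simp only [List.length_cons] at h
      have hi : i < flag.length := by omega
      rw [ih (flag.set i (!ws)) (i + 1) false (by rw [List.length_set]; omega)]
      rw [pvTakeSet flag i (!ws) hi]
      simp

theorem pvSpecFlags_eq_chain (ts : List String) :
    ∀ (n : Int) (ws : Bool) (prev : Option Int),
      (∀ q, prev = some q → q < n) →
      (ws = false ↔ ∃ q, prev = some q ∧ q + 1 = n) →
      pvSpecFlags ts ws = pvChain prev (pvPosFrom n ts) := by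
  induction ts with
  | nil => intro n ws prev _ _; cases prev <;> simp [pvSpecFlags, pvPosFrom, pvChain]
  | cons t r ih =>
    intro n ws prev hlt hiff
    by_cases ht : t = ""
    · simp only [pvSpecFlags, pvPosFrom, ht, if_true]
      apply ih (n + 1) true prev
      · intro q hq; have := hlt q hq; omega
      · constructor
        · intro hcontra; exact absurd hcontra (by simp)
        · rintro ⟨q, hq, hq1⟩; have := hlt q hq; omega
    · simp only [pvSpecFlags, pvPosFrom, if_neg ht]
      have htail : pvSpecFlags r false = pvChain (some n) (pvPosFrom (n + 1) r) := by
        apply ih (n + 1) false (some n)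
        · intro q hq; injection hq with h; omega
        · exact ⟨fun _ => ⟨n, rfl, rfl⟩, fun _ => rfl⟩
      cases prev with
      | none =>
        have hws : ws = true := by
          cases ws
          · rcases hiff.mp rfl with ⟨q, hq, _⟩; simp at hq
          · rfl
        subst hws
        simp only [pvChain, Bool.not_true]
        rw [htail]
      | some q =>
        simp only [pvChain]
        have hhead : (!ws) = decide (n = q + 1) := by
          by_cases hq : q + 1 = n
          · have hws : ws = false := hiff.mpr ⟨q, rfl, hq⟩
            simp [hws, hq]
          · have hws : ws = true := by
              cases ws
              · rcases hiff.mp rfl with ⟨q', hq', h1⟩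
                injection hq' with h2
                exact absurd (h2 ▸ h1) hq
              · rfl
            simp only [hws, Bool.not_true]
            have : ¬ n = q + 1 := by omega
            simp [this]
        rw [hhead, htail]

theorem pvPositions_eq_posFrom (ts : List String) :
    ∀ (n : Int),
      ((PySem.List.enumerate ts n).filter (fun p => p.2 ≠ "")).map (·.1) = pvPosFrom n ts := by
  induction ts with
  | nil => intro n; simp [PySem.List.enumerate_nil, pvPosFrom]
  | cons t r ih =>
    intro n
    rw [PySem.List.enumerate_cons]
    by_cases ht : t = ""
    · rw [List.filter_cons_of_neg (by simp [ht])]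
      simp only [pvPosFrom, if_pos ht]
      exact ih (n + 1)
    · rw [List.filter_cons_of_pos (by simp [ht])]
      simp only [List.map_cons, pvPosFrom, if_neg ht]
      rw [ih (n + 1)]

theorem pvChain_some_eq_zipWith (rest : List Int) :
    ∀ (p : Int),
      pvChain (some p) rest = List.zipWith (fun a b => decide (b = a + 1)) (p :: rest) rest := by
  induction rest with
  | nil => intro p; simp [pvChain]
  | cons q rest ih => intro p; simp [pvChain, ih q]

-- ===== VERDICT (by name: the statement is the Claim_ definition above) =====
theorem getspaceafterflag_py_spec : Claim_equal_getspaceafterflag_py := by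
  intro tokens _
  unfold Spec_getspaceafterflag_py getspaceafterflag_py getspaceafterflag_py_alt
    getspaceafterflag_py_positions
  rw [pvPositions_eq_posFrom tokens 0]
  rw [pvLoop_eq_specFlags tokens _ 0 true (by simp)]
  rw [pvSpecFlags_eq_chain tokens 0 true none (by simp) (by simp)]
  rw [PySem.List.slice_from_one, PySem.List.slice_from_one]
  cases h : pvPosFrom 0 tokens with
  | nil => simp [pvChain]
  | cons p rest => simp [pvChain, pvChain_some_eq_zipWith rest p]
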